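-- pv_equiv track=rewrite | github.com/MKarthihan/Course-Work | CP 104/Labs/Lists/functions.py | list_categorize
-- ===== SOURCE A (Python) =====
-- def list_categorize(values):
--     """
--     -------------------------------------------------------
--     Returns data about the categories of values in a list.
--     Use: negatives, positives, zeroes, evens, odds = list_categorize(values)
--     -------------------------------------------------------
--     Parameters:
--         values - a list of values (list of int)
--     Returns:
--         negatives - the number of negative values (int)
--         positives - the number of positive values (int)
--         zeroes - the number of zeroes (int)
--         evens - the number of even values (int)
--         odds - the number of odd values (int)
--     -------------------------------------------------------
--     """
--     negatives = 0
--     positives = 0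
--     zeroes = 0
--     evens = 0
--     odds = 0
--     number = len(values)
--     for value in range(number):
--         if values[value] == 0:
--             zeroes += 1
--
--         if values[value] > 0:
--             positives += 1
--
--         if values[value] < 0:
--             negatives += 1
--
--         if values[value] % 2 == 0:
--             evens += 1
--         elif values[value] % 2 != 0:
--             odds += 1
--
--     return negatives, positives, zeroes, evens, odds
-- ===== SOURCE B (Python) =====
-- def list_categorize(values):
--     # Idiomatic rewrite: five independent generator-sum passes, one per category,
--     # instead of A's single index loop with five branch counters.
--     negatives = sum(1 for v in values if v < 0)
--     positives = sum(1 for v in values if v > 0)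
--     zeroes = sum(1 for v in values if v == 0)
--     evens = sum(1 for v in values if v % 2 == 0)
--     odds = sum(1 for v in values if v % 2 != 0)
--     return negatives, positives, zeroes, evens, odds
-- ===== Notes on version B (the rewrite author's own statement) =====
-- stated objective: idiomatic
-- what changed: A's single index-based loop over range(len(values)) updating five branch counters is replaced by five independent one-category generator-sum scans of the list.
import Mathlib
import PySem

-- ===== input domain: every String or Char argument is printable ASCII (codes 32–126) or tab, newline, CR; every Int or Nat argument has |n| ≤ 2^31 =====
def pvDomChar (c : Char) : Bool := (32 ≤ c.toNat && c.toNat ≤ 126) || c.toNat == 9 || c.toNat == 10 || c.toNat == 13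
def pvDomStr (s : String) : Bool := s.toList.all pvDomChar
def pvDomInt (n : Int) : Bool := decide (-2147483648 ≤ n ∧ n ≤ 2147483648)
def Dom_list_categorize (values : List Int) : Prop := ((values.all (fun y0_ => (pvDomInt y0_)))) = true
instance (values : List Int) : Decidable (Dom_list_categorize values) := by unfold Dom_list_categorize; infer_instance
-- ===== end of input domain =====

-- B: idiomatic rewrite — five independent per-category count passes instead of one index loop with five counters.


-- ===== PORT A =====
def list_categorize (values : List Int) : Int × Int × Int × Int × Int :=
  let number : Int := values.length
  let st := (PySem.List.pyRange 0 number 1).foldl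
    (fun (s : Int × Int × Int × Int × Int) value =>
      let v := PySem.List.pyGetD values value 0
      let zeroes := if v == 0 then s.2.2.1 + 1 else s.2.2.1
      let positives := if v > 0 then s.2.1 + 1 else s.2.1
      let negatives := if v < 0 then s.1 + 1 else s.1
      let evens := if PySem.Int.mod v 2 == 0 then s.2.2.2.1 + 1 else s.2.2.2.1
      let odds := if PySem.Int.mod v 2 == 0 then s.2.2.2.2
                  else if PySem.Int.mod v 2 != 0 then s.2.2.2.2 + 1 else s.2.2.2.2
      (negatives, positives, zeroes, evens, odds))
    (0, 0, 0, 0, 0)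
  st

-- ===== PORT B =====
def list_categorize_alt (values : List Int) : Int × Int × Int × Int × Int :=
  let negatives : Int := values.countP (fun v => v < 0)
  let positives : Int := values.countP (fun v => v > 0)
  let zeroes : Int := values.countP (fun v => v == 0)
  let evens : Int := values.countP (fun v => PySem.Int.mod v 2 == 0)
  let odds : Int := values.countP (fun v => PySem.Int.mod v 2 != 0)
  (negatives, positives, zeroes, evens, odds)

-- ===== PRECONDITION & SPEC =====
def Spec_list_categorize (values : List Int) (out : Int × Int × Int × Int × Int) : Prop := out = list_categorize_alt values
instance (values : List Int) (out : Int × Int × Int × Int × Int) : Decidable (Spec_list_categorize values out) := by unfold Spec_list_categorize; infer_instance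

-- ===== CLAIM (what is proved, stated in full; the proofs are below) =====
def Claim_equal_list_categorize : Prop := ∀ (values : List Int), Dom_list_categorize values → Spec_list_categorize values (list_categorize values)

-- ===== LEMMAS AND PROOFS =====

theorem catstep_foldl (xs : List Int) (s : Int × Int × Int × Int × Int) :
    xs.foldl
      (fun (s : Int × Int × Int × Int × Int) (v : Int) =>
        (if v < 0 then s.1 + 1 else s.1,
         if v > 0 then s.2.1 + 1 else s.2.1,
         if (v == 0) = true then s.2.2.1 + 1 else s.2.2.1,
         if (PySem.Int.mod v 2 == 0) = true then s.2.2.2.1 + 1 else s.2.2.2.1,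
         if (PySem.Int.mod v 2 == 0) = true then s.2.2.2.2
         else if (PySem.Int.mod v 2 != 0) = true then s.2.2.2.2 + 1 else s.2.2.2.2)) s =
    (s.1 + (xs.countP (fun v => v < 0) : Int),
     s.2.1 + (xs.countP (fun v => v > 0) : Int),
     s.2.2.1 + (xs.countP (fun v => v == 0) : Int),
     s.2.2.2.1 + (xs.countP (fun v => PySem.Int.mod v 2 == 0) : Int),
     s.2.2.2.2 + (xs.countP (fun v => PySem.Int.mod v 2 != 0) : Int)) := by
  induction xs generalizing s with
  | nil => simp
  | cons x xs ih =>
      rw [List.foldl_cons, ih]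
      simp only [List.countP_cons, Prod.mk.injEq, decide_eq_true_eq, bne_iff_ne, beq_iff_eq]
      refine ⟨?_, ?_, ?_, ?_, ?_⟩ <;> split_ifs <;> push_cast <;> omega

theorem list_categorize_eq_counts (values : List Int) :
    list_categorize values = list_categorize_alt values := by
  simp only [list_categorize, list_categorize_alt]
  rw [PySem.List.foldl_pyRange_zero_pyGetD' values 0
      (fun (s : Int × Int × Int × Int × Int) (v : Int) =>
        (if v < 0 then s.1 + 1 else s.1,
         if v > 0 then s.2.1 + 1 else s.2.1,
         if (v == 0) = true then s.2.2.1 + 1 else s.2.2.1,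
         if (PySem.Int.mod v 2 == 0) = true then s.2.2.2.1 + 1 else s.2.2.2.1,
         if (PySem.Int.mod v 2 == 0) = true then s.2.2.2.2
         else if (PySem.Int.mod v 2 != 0) = true then s.2.2.2.2 + 1 else s.2.2.2.2))
      (0, 0, 0, 0, 0),
     catstep_foldl values (0, 0, 0, 0, 0)]
  simp

-- ===== VERDICT (by name: the statement is the Claim_ definition above) =====
theorem list_categorize_spec : Claim_equal_list_categorize := by
  intro values _
  unfold Spec_list_categorize
  exact list_categorize_eq_counts values
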